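-- pv_equiv track=rewrite | github.com/tirthasg/Data-Structures-And-Algorithms | Combinatorial-Enumeration/Subsets/13_subsequences_of_list_II.py | subsequences_with_duplicates
-- ===== SOURCE A (Python) =====
-- def subsequences_with_duplicates(nums):
--     def helper(nums, i, slate):
--         result.append(slate[:])
--
--         if i == len(nums):
--             return
--
--         uniques = set()
--         for pick in range(i, len(nums)):
--             if nums[pick] in uniques:
--                 continue
--             uniques.add(nums[pick])
--
--             slate.append(nums[pick])
--             helper(nums, pick + 1, slate)
--             slate.pop()
--
--     result = []
--     helper(nums, 0, [])
--     return result
-- ===== SOURCE B (Python) =====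
-- def subsequences_with_duplicates(nums):
--     n = len(nums)
--     result = []
--     stack = [(0, [])]
--     while stack:
--         i, slate = stack.pop()
--         result.append(slate)
--         seen = set()
--         children = []
--         for pick in range(i, n):
--             v = nums[pick]
--             if v not in seen:
--                 seen.add(v)
--                 children.append((pick + 1, slate + [v]))
--         stack.extend(reversed(children))
--     return result
-- ===== Notes on version B (the rewrite author's own statement) =====
-- stated objective: alternative
-- what changed: Replaces A's mutating recursive DFS helper (shared slate with append/pop, global result) with an iterative while-loop over an explicit LIFO stack of (index, slate) frames, each frame collecting its distinct-value children once and pushing them in reverse so the same preorder emerges.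
import Mathlib
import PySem

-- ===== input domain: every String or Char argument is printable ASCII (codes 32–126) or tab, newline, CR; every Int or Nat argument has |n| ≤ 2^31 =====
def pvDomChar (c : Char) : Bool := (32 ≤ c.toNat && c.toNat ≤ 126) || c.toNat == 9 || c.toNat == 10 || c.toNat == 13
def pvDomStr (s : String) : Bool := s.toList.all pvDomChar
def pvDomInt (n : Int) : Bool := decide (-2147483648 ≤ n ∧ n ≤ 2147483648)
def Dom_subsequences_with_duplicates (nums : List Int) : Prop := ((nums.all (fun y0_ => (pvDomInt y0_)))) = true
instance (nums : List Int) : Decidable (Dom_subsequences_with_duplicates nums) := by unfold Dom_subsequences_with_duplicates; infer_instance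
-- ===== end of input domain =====

-- B replaces A's recursion with an iterative loop over an explicit stack of (index, slate)
-- frames (same preorder); A mutates a shared slate/result, B builds fresh lists — the
-- equivalence proved is about the RETURN value. Both Lean ports carry a fuel argument as a
-- totality guard only (the entry points pass provably sufficient fuel).

-- ===== PORT A =====
-- A's recursive helper. The result-appends are modelled as the returned list (preorder);
-- the 'for pick in range(i, len(nums))' loop with the per-level 'uniques' set is the foldl,
-- whose state is (uniques, chunks appended so far); 'continue' leaves the state unchanged.
def pvHelperA (nums : List Int) : Nat → Nat → List Int → List (List Int)
  | 0, _, slate => [slate]  -- fuel exhausted (unreachable from the entry point's fuel)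
  | fuel + 1, i, slate =>
      slate ::
        (if i = nums.length then []
         else ((List.range' i (nums.length - i)).foldl
            (fun (st : PySem.Set Int × List (List Int)) pick =>
              let v := nums.getD pick 0
              if PySem.Set.contains st.1 v then st
              else (PySem.Set.add st.1 v,
                    st.2 ++ pvHelperA nums fuel (pick + 1) (slate ++ [v])))
            (PySem.Set.empty, ([] : List (List Int)))).2)

def subsequences_with_duplicates (nums : List Int) : List (List Int) :=
  pvHelperA nums (nums.length + 1) 0 []

-- ===== PORT B =====
-- B's inner for-loop: collect this frame's child frames (pick+1, slate + [v]), one per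
-- distinct value from index i on, first occurrences kept (per-frame 'seen' set).
def pvChildrenB (nums : List Int) (i : Nat) (slate : List Int) : List (Nat × List Int) :=
  ((List.range' i (nums.length - i)).foldl
    (fun (st : PySem.Set Int × List (Nat × List Int)) pick =>
      let v := nums.getD pick 0
      if PySem.Set.contains st.1 v then st
      else (PySem.Set.add st.1 v, st.2 ++ [(pick + 1, slate ++ [v])]))
    (PySem.Set.empty, ([] : List (Nat × List Int)))).2

-- B's while-loop over the explicit stack (head of the list = top of the Python stack;
-- Python's stack.extend(reversed(children)) is prepending 'children' in order here).
def pvRunB (nums : List Int) : Nat → List (Nat × List Int) → List (List Int) → List (List Int)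
  | _, [], result => result
  | 0, _ :: _, result => result  -- fuel exhausted (unreachable from the entry point's fuel)
  | fuel + 1, (i, slate) :: rest, result =>
      pvRunB nums fuel (pvChildrenB nums i slate ++ rest) (result ++ [slate])

def subsequences_with_duplicates_alt (nums : List Int) : List (List Int) :=
  pvRunB nums (2 ^ (nums.length + 1)) [(0, [])] []

-- ===== PRECONDITION & SPEC =====
def Spec_subsequences_with_duplicates (nums : List Int) (out : List (List Int)) : Prop := out = subsequences_with_duplicates_alt nums
instance (nums : List Int) (out : List (List Int)) : Decidable (Spec_subsequences_with_duplicates nums out) := by unfold Spec_subsequences_with_duplicates; infer_instance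

-- ===== CLAIM (what is proved, stated in full; the proofs are below) =====
def Claim_equal_subsequences_with_duplicates : Prop := ∀ (nums : List Int), Dom_subsequences_with_duplicates nums → Spec_subsequences_with_duplicates nums (subsequences_with_duplicates nums)

-- ===== LEMMAS AND PROOFS =====

-- A's inner fold accumulates exactly the flattening (by pvHelperA) of B's child frames
theorem pvFoldAB (nums : List Int) (fuel : Nat) (slate : List Int) (picks : List Nat) :
    ∀ (seen : PySem.Set Int) (accF : List (Nat × List Int)),
    picks.foldl
        (fun (st : PySem.Set Int × List (List Int)) pick =>
          let v := nums.getD pick 0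
          if PySem.Set.contains st.1 v then st
          else (PySem.Set.add st.1 v,
                st.2 ++ pvHelperA nums fuel (pick + 1) (slate ++ [v])))
        (seen, accF.flatMap (fun p => pvHelperA nums fuel p.1 p.2))
      = ((picks.foldl
            (fun (st : PySem.Set Int × List (Nat × List Int)) pick =>
              let v := nums.getD pick 0
              if PySem.Set.contains st.1 v then st
              else (PySem.Set.add st.1 v, st.2 ++ [(pick + 1, slate ++ [v])]))
            (seen, accF)).1,
         ((picks.foldl
            (fun (st : PySem.Set Int × List (Nat × List Int)) pick =>
              let v := nums.getD pick 0
              if PySem.Set.contains st.1 v then st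
              else (PySem.Set.add st.1 v, st.2 ++ [(pick + 1, slate ++ [v])]))
            (seen, accF)).2).flatMap (fun p => pvHelperA nums fuel p.1 p.2)) := by
  induction picks with
  | nil => intro seen accF; simp
  | cons pick rest ih =>
      intro seen accF
      simp only [List.foldl_cons]
      by_cases hv : PySem.Set.contains seen (nums.getD pick 0)
      · simp only [hv, if_pos]
        exact ih seen accF
      · simp only [hv, if_neg, Bool.false_eq_true, not_false_iff]
        have := ih (PySem.Set.add seen (nums.getD pick 0))
          (accF ++ [(pick + 1, slate ++ [nums.getD pick 0])])
        simpa using this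

-- one unfolding step of A's helper, phrased through B's child frames
theorem pvHelperA_succ (nums : List Int) (fuel : Nat) (i : Nat) (slate : List Int) :
    pvHelperA nums (fuel + 1) i slate
      = slate :: (pvChildrenB nums i slate).flatMap
          (fun p => pvHelperA nums fuel p.1 p.2) := by
  rw [pvHelperA, pvChildrenB]
  by_cases h : i = nums.length
  · simp [h]
  · simp only [h, if_neg, not_false_iff]
    have := pvFoldAB nums fuel slate (List.range' i (nums.length - i)) PySem.Set.empty []
    simp only [List.flatMap_nil] at this
    rw [this]

-- every child frame's index lies in (i, nums.length]
theorem pvChildrenB_mem (nums : List Int) (i : Nat) (slate : List Int) :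
    ∀ p ∈ pvChildrenB nums i slate, i < p.1 ∧ p.1 ≤ nums.length := by
  have key : ∀ (picks : List Nat) (seen : PySem.Set Int) (acc : List (Nat × List Int))
      (q : Nat × List Int),
      q ∈ (picks.foldl
            (fun (st : PySem.Set Int × List (Nat × List Int)) pick =>
              let v := nums.getD pick 0
              if PySem.Set.contains st.1 v then st
              else (PySem.Set.add st.1 v, st.2 ++ [(pick + 1, slate ++ [v])]))
            (seen, acc)).2 →
      q ∈ acc ∨ ∃ pick ∈ picks, q.1 = pick + 1 := by
    intro picks
    induction picks with
    | nil => intro seen acc q hq; exact Or.inl hq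
    | cons pick rest ih =>
        intro seen acc q hq
        simp only [List.foldl_cons] at hq
        by_cases hv : PySem.Set.contains seen (nums.getD pick 0)
        · simp only [hv, if_pos] at hq
          rcases ih _ _ _ hq with h | ⟨p', hp', he⟩
          · exact Or.inl h
          · exact Or.inr ⟨p', List.mem_cons_of_mem _ hp', he⟩
        · simp only [hv, if_neg, Bool.false_eq_true, not_false_iff] at hq
          rcases ih _ _ _ hq with h | ⟨p', hp', he⟩
          · rcases List.mem_append.1 h with h | h
            · exact Or.inl h
            · simp only [List.mem_singleton] at h
              exact Or.inr ⟨pick, List.mem_cons_self .., by rw [h]⟩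
          · exact Or.inr ⟨p', List.mem_cons_of_mem _ hp', he⟩
  intro p hp
  rcases key _ _ _ _ hp with h | ⟨pick, hpick, he⟩
  · simp at h
  · have := List.mem_range'_1.1 hpick
    omega

-- with enough fuel the helper's value does not depend on the fuel
theorem pvHelperA_fuel (nums : List Int) :
    ∀ (d i : Nat) (slate : List Int) (f g : Nat), nums.length - i ≤ d →
      nums.length - i < f → nums.length - i < g →
      pvHelperA nums f i slate = pvHelperA nums g i slate := by
  intro d
  induction d with
  | zero =>
      intro i slate f g hd hf hg
      obtain ⟨f', rfl⟩ : ∃ f', f = f' + 1 := ⟨f - 1, by omega⟩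
      obtain ⟨g', rfl⟩ : ∃ g', g = g' + 1 := ⟨g - 1, by omega⟩
      rw [pvHelperA_succ, pvHelperA_succ]
      have hi : i = nums.length ∨ nums.length < i := by omega
      have hc : pvChildrenB nums i slate = [] := by
        rw [pvChildrenB]
        have : nums.length - i = 0 := by omega
        simp [this]
      rw [hc]
      simp
  | succ d ih =>
      intro i slate f g hd hf hg
      obtain ⟨f', rfl⟩ : ∃ f', f = f' + 1 := ⟨f - 1, by omega⟩
      obtain ⟨g', rfl⟩ : ∃ g', g = g' + 1 := ⟨g - 1, by omega⟩
      rw [pvHelperA_succ, pvHelperA_succ]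
      congr 1
      apply List.flatMap_congr  -- may not exist; fallback below
      intro p hp
      have hm := pvChildrenB_mem nums i slate p hp
      exact ih p.1 p.2 f' g' (by omega) (by omega) (by omega)

-- the canonical (fully fuelled) helper
def pvH (nums : List Int) (p : Nat × List Int) : List (List Int) :=
  pvHelperA nums (nums.length + 1) p.1 p.2

theorem pvH_step (nums : List Int) (i : Nat) (slate : List Int) :
    pvH nums (i, slate)
      = slate :: (pvChildrenB nums i slate).flatMap (pvH nums) := by
  show pvHelperA nums (nums.length + 1) i slate = _
  rw [pvHelperA_succ]
  congr 1
  apply List.flatMap_congr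
  intro p hp
  have hm := pvChildrenB_mem nums i slate p hp
  exact pvHelperA_fuel nums (nums.length) p.1 p.2 _ _ (by omega) (by omega) (by omega)

-- frame weight for the fuel bound of B's stack loop
def pvW (n : Nat) (p : Nat × List Int) : Nat := 2 ^ (n + 1 - p.1)

theorem pvChildrenB_weight (nums : List Int) (i : Nat) (slate : List Int) :
    ((pvChildrenB nums i slate).map (pvW nums.length)).sum
      ≤ 2 ^ (nums.length + 1 - i) - 2 := by
  have key : ∀ (k pick : Nat) (seen : PySem.Set Int) (acc : List (Nat × List Int)),
      pick + k ≤ nums.length →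
      ((((List.range' pick k).foldl
          (fun (st : PySem.Set Int × List (Nat × List Int)) p =>
            let v := nums.getD p 0
            if PySem.Set.contains st.1 v then st
            else (PySem.Set.add st.1 v, st.2 ++ [(p + 1, slate ++ [v])]))
          (seen, acc)).2).map (pvW nums.length)).sum
        ≤ (acc.map (pvW nums.length)).sum + (2 ^ (nums.length + 1 - pick) - 2) := by
    intro k
    induction k with
    | zero => intro pick seen acc h; simp
    | succ k ih =>
        intro pick seen acc h
        rw [List.range'_succ]
        simp only [List.foldl_cons]
        have hpow : 2 ^ (nums.length + 1 - pick)
            = 2 * 2 ^ (nums.length + 1 - (pick + 1)) := by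
          rw [← pow_succ']
          congr 1
          omega
        have hpos : 2 ≤ 2 ^ (nums.length + 1 - (pick + 1)) :=
          Nat.one_lt_two_pow (by omega)
        by_cases hv : PySem.Set.contains seen (nums.getD pick 0)
        · simp only [hv, if_pos]
          exact le_trans (ih (pick + 1) seen acc (by omega)) (by omega)
        · simp only [hv, if_neg, Bool.false_eq_true, not_false_iff]
          have := ih (pick + 1) (PySem.Set.add seen (nums.getD pick 0))
            (acc ++ [(pick + 1, slate ++ [nums.getD pick 0])]) (by omega)
          simp only [List.map_append, List.sum_append, List.map_cons, List.sum_cons,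
            List.map_nil, List.sum_nil, pvW] at this
          omega
  by_cases hi : i ≤ nums.length
  · have := key (nums.length - i) i PySem.Set.empty [] (by omega)
    rw [pvChildrenB]
    simpa using this
  · rw [pvChildrenB]
    have : nums.length - i = 0 := by omega
    simp [this]

-- B's stack loop, with sufficient fuel, emits the concatenated preorders of its frames
theorem pvRunB_eq_flat (nums : List Int) :
    ∀ (fuel : Nat) (stack : List (Nat × List Int)) (result : List (List Int)),
      (stack.map (pvW nums.length)).sum ≤ fuel →
      pvRunB nums fuel stack result = result ++ stack.flatMap (pvH nums) := by
  intro fuel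
  induction fuel with
  | zero =>
      intro stack result h
      cases stack with
      | nil => simp [pvRunB]
      | cons p rest =>
          exfalso
          simp only [List.map_cons, List.sum_cons] at h
          have : 0 < pvW nums.length p := by unfold pvW; exact Nat.two_pow_pos _
          omega
  | succ fuel ih =>
      intro stack result h
      cases stack with
      | nil => simp [pvRunB]
      | cons p rest =>
          obtain ⟨i, slate⟩ := p
          rw [pvRunB]
          have hc := pvChildrenB_weight nums i slate
          have hw : 0 < 2 ^ (nums.length + 1 - i) := Nat.two_pow_pos _
          simp only [List.map_cons, List.sum_cons, pvW] at h
          rw [ih (pvChildrenB nums i slate ++ rest) (result ++ [slate]) (by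
            simp only [List.map_append, List.sum_append]
            omega)]
          rw [List.flatMap_cons, pvH_step]
          simp

-- ===== VERDICT (by name: the statement is the Claim_ definition above) =====
theorem subsequences_with_duplicates_spec : Claim_equal_subsequences_with_duplicates := by
  intro nums _
  unfold Spec_subsequences_with_duplicates subsequences_with_duplicates subsequences_with_duplicates_alt
  rw [pvRunB_eq_flat nums _ _ _ (by simp [pvW])]
  simp [pvH]
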